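-- pv_equiv track=rewrite | github.com/GuangFuHero/legacy-version | backend/api-server/guanfu_backend/src/services/line_auth.py | parse_scopes
-- ===== SOURCE A (Python) =====
-- from typing import Optional, Dict, Callable
--
-- def parse_scopes(scopes_text: Optional[str]) -> set[str]:
--     if not scopes_text:
--         return set()
--     parts = [p.strip().lower() for p in scopes_text.replace("\n", " ").split(",")]
--     scopes = set()
--     for part in parts:
--         if not part:
--             continue
--         scopes.update(s.strip() for s in part.split() if s.strip())
--     return scopes
-- ===== SOURCE B (Python) =====
-- from typing import Optional
--
--
-- def parse_scopes(scopes_text: Optional[str]) -> set[str]: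
--     if not scopes_text:
--         return set()
--     scopes = set()
--     token = []
--     for ch in scopes_text:
--         if ch == ',' or ch.isspace():
--             if token:
--                 scopes.add(''.join(token))
--                 token = []
--         else:
--             token.append(ch.lower())
--     if token:
--         scopes.add(''.join(token))
--     return scopes
-- ===== Notes on version B (the rewrite author's own statement) =====
-- stated objective: alternative
-- what changed: Replaces A's staged string passes (replace newlines, split on commas, then per-part strip/lower/whitespace-split) by a single character-level state machine: one pass over the text with an explicit token accumulator, lowercasing characters as they are read and emitting a token at each comma/whitespace delimiter.
import Mathlib
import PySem

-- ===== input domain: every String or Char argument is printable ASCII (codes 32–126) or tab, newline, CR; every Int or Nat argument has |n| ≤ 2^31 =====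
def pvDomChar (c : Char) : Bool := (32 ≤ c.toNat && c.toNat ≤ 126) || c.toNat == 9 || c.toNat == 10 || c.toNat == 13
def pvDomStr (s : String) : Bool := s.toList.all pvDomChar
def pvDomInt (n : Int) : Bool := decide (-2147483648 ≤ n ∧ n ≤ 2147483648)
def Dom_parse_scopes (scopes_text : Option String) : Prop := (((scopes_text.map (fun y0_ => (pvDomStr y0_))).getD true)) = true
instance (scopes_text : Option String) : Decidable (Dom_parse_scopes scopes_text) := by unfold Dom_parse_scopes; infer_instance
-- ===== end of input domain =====

-- B replaces A's staged split/strip/lower passes by a single character-level state machine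
-- (one pass, explicit token accumulator, lowercasing as it reads): an alternative decomposition.


-- ===== PORT A =====
-- 'scopes_text.split(",")' ported as split? with the non-empty literal ",": never none.
def parse_scopes (scopes_text : Option String) : List String :=
  match scopes_text with
  | none => []
  | some s =>
    if s = "" then []
    else
      let parts := ((PySem.Str.split? (PySem.Str.replace s "\n" " ") ",").getD []).map
        (fun p => PySem.Str.lower (PySem.Str.strip p))
      parts.foldl (fun scopes part =>
        if part = "" then scopes
        else PySem.Set.update scopes
          (((PySem.Str.split₀ part).filter (fun t => !(PySem.Str.strip t == ""))).map
            PySem.Str.strip)) PySem.Set.empty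

-- ===== PORT B =====
-- one step of Source B's loop body: state = (scopes, current token characters)
def psB_step (st : PySem.Set String × List Char) (c : Char) : PySem.Set String × List Char :=
  if (c == ',') || PySem.Chars.isspace c then
    if st.2.isEmpty then st else (PySem.Set.add st.1 (String.ofList st.2), [])
  else (st.1, st.2 ++ [PySem.Chars.lowerChar c])

-- Source B's trailing 'if token: scopes.add(''.join(token))'
def psB_finish (st : PySem.Set String × List Char) : PySem.Set String :=
  if st.2.isEmpty then st.1 else PySem.Set.add st.1 (String.ofList st.2)

def parse_scopes_alt (scopes_text : Option String) : List String :=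
  match scopes_text with
  | none => []
  | some s =>
    if s = "" then []
    else psB_finish (s.toList.foldl psB_step (PySem.Set.empty, []))

-- ===== PRECONDITION & SPEC =====
def Spec_parse_scopes (scopes_text : Option String) (out : List String) : Prop := out = parse_scopes_alt scopes_text
instance (scopes_text : Option String) (out : List String) : Decidable (Spec_parse_scopes scopes_text out) := by unfold Spec_parse_scopes; infer_instance

-- ===== CLAIM (what is proved, stated in full; the proofs are below) =====
def Claim_equal_parse_scopes : Prop := ∀ (scopes_text : Option String), Dom_parse_scopes scopes_text → Spec_parse_scopes scopes_text (parse_scopes scopes_text)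

-- ===== LEMMAS AND PROOFS =====

def cmC (c : Char) : Char := if c = ',' then ' ' else c
def nlC (c : Char) : Char := if c = '\n' then ' ' else c
def psF (c : Char) : Char := PySem.Chars.lowerChar (cmC c)

theorem isspace_false_of_mid (c : Char) (h1 : 33 ≤ c.toNat) (h2 : c.toNat ≤ 126) :
    PySem.Chars.isspace c = false := by
  unfold PySem.Chars.isspace
  simp only [Bool.or_eq_false_iff, Bool.and_eq_false_iff, decide_eq_false_iff_not]
  omega

theorem lowerChar_isspace (c : Char) :
    PySem.Chars.isspace (PySem.Chars.lowerChar c) = PySem.Chars.isspace c := by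
  unfold PySem.Chars.lowerChar
  split
  · rename_i h
    unfold PySem.Chars.isupper at h
    simp only [Bool.and_eq_true, decide_eq_true_eq, Char.le_def] at h
    have h1 : 65 ≤ c.toNat := h.1
    have h2 : c.toNat ≤ 90 := h.2
    have hv : (Char.ofNat (c.toNat + 32)).toNat = c.toNat + 32 := by
      rw [Char.toNat_ofNat, if_pos]
      exact Or.inl (by omega)
    rw [isspace_false_of_mid _ (by omega) (by omega),
        isspace_false_of_mid c (by omega) (by omega)]
  · rfl

theorem lowerChar_ne_comma (c : Char) (h : c ≠ ',') : PySem.Chars.lowerChar c ≠ ',' := by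
  unfold PySem.Chars.lowerChar
  split
  · rename_i hu
    unfold PySem.Chars.isupper at hu
    simp only [Bool.and_eq_true, decide_eq_true_eq, Char.le_def] at hu
    have h1 : 65 ≤ c.toNat := hu.1
    have h2 : c.toNat ≤ 90 := hu.2
    intro hc
    have hco : (',' : Char).toNat = 44 := by decide
    have hv : (Char.ofNat (c.toNat + 32)).toNat = (',' : Char).toNat := by rw [hc]
    rw [Char.toNat_ofNat, if_pos (Or.inl (by omega : c.toNat + 32 < 55296)), hco] at hv
    omega
  · exact h

theorem cm_lower (c : Char) : cmC (PySem.Chars.lowerChar c) = PySem.Chars.lowerChar (cmC c) := by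
  by_cases h : c = ','
  · subst h; decide
  · rw [show cmC c = c from if_neg h, cmC, if_neg (lowerChar_ne_comma c h)]

theorem cm_nl (c : Char) : cmC (nlC c) = nlC (cmC c) := by
  by_cases h : c = '\n'
  · subst h; decide
  · by_cases h2 : c = ','
    · subst h2; decide
    · simp [cmC, nlC, h, h2]

theorem nlC_space (c : Char) :
    (PySem.Chars.isspace c = true ∧ PySem.Chars.isspace (nlC c) = true) ∨ nlC c = c := by
  by_cases h : c = '\n'
  · subst h; left; decide
  · right; simp [nlC, h]

theorem isspace_psF (c : Char) :
    PySem.Chars.isspace (psF c) = ((c == ',') || PySem.Chars.isspace c) := by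
  rw [psF, lowerChar_isspace]
  by_cases h : c = ','
  · subst h; decide
  · rw [show cmC c = c from if_neg h]
    simp [h]

theorem psF_of_ne_comma (c : Char) (h : ¬ c = ',') : psF c = PySem.Chars.lowerChar c := by
  rw [psF, show cmC c = c from if_neg h]

theorem replace_go_single (a b : Char) :
    ∀ (fuel : Nat) (l acc : List Char), l.length ≤ fuel →
      PySem.Chars.replace.go [a] [b] fuel l acc
        = acc.reverse ++ l.map (fun c => if c = a then b else c) := by
  intro fuel
  induction fuel with
  | zero =>
    intro l acc h
    have : l = [] := List.eq_nil_of_length_eq_zero (Nat.le_zero.mp h)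
    subst this
    simp [PySem.Chars.replace.go]
  | succ n ih =>
    intro l acc h
    cases l with
    | nil => simp [PySem.Chars.replace.go]
    | cons c t =>
      simp only [PySem.Chars.replace.go, List.isPrefixOf, List.isPrefixOf_nil_left,
        Bool.and_true]
      by_cases hc : a = c
      · subst hc
        rw [if_pos (by simp)]
        rw [ih _ _ (by simpa using h)]
        simp
      · rw [if_neg (by simpa using hc)]
        rw [ih _ _ (by simpa using Nat.le_of_succ_le_succ (by simpa using h))]
        simp [Ne.symm hc]

theorem replace_single (a b : Char) (l : List Char) :
    PySem.Chars.replace l [a] [b] = l.map (fun c => if c = a then b else c) := by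
  rw [PySem.Chars.replace]
  rw [if_neg (by simp)]
  exact replace_go_single a b l.length l [] le_rfl

theorem split0_go_acc :
    ∀ (l cur : List Char) (acc : List (List Char)),
      PySem.Chars.split₀.go l cur acc = acc.reverse ++ PySem.Chars.split₀.go l cur [] := by
  intro l
  induction l with
  | nil =>
    intro cur acc
    by_cases h : cur.isEmpty <;> simp [PySem.Chars.split₀.go, h]
  | cons c t ih =>
    intro cur acc
    by_cases hs : PySem.Chars.isspace c
    · by_cases hc : cur.isEmpty
      · simp only [PySem.Chars.split₀.go, hs, hc, if_true]
        exact ih [] acc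
      · simp only [PySem.Chars.split₀.go, hs, hc, if_true, if_false, Bool.false_eq_true]
        rw [ih [] (cur.reverse :: acc), ih [] [cur.reverse]]
        simp
    · simp only [PySem.Chars.split₀.go, hs, Bool.false_eq_true, if_false]
      exact ih (c :: cur) acc

theorem split0_go_space (v : List Char) :
    ∀ (u cur : List Char) (acc : List (List Char)),
      PySem.Chars.split₀.go (u ++ ' ' :: v) cur acc
        = PySem.Chars.split₀.go u cur acc ++ PySem.Chars.split₀ v := by
  intro u
  induction u with
  | nil =>
    intro cur acc
    have hsp : PySem.Chars.isspace ' ' = true := by decide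
    by_cases hc : cur.isEmpty
    · simp only [List.nil_append, PySem.Chars.split₀.go, hsp, hc, if_true, PySem.Chars.split₀]
      rw [split0_go_acc v [] acc]
    · simp only [List.nil_append, PySem.Chars.split₀.go, hsp, hc, if_true, if_false,
        Bool.false_eq_true, PySem.Chars.split₀]
      rw [split0_go_acc v [] (cur.reverse :: acc)]
  | cons c t ih =>
    intro cur acc
    by_cases hs : PySem.Chars.isspace c
    · by_cases hc : cur.isEmpty <;>
        simp only [List.cons_append, PySem.Chars.split₀.go, hs, hc, if_true, if_false,
          Bool.false_eq_true] <;> apply ih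
    · simp only [List.cons_append, PySem.Chars.split₀.go, hs, Bool.false_eq_true, if_false]
      apply ih

def scgo (a : Char) : List Char → List Char → List (List Char)
  | [], cur => [cur.reverse]
  | c :: rest, cur => if c = a then cur.reverse :: scgo a rest [] else scgo a rest (c :: cur)

theorem splitOn_go_single (a : Char) :
    ∀ (fuel : Nat) (l cur : List Char) (acc : List (List Char)), l.length ≤ fuel →
      PySem.Chars.splitOn.go [a] fuel l cur acc = acc.reverse ++ scgo a l cur := by
  intro fuel
  induction fuel with
  | zero =>
    intro l cur acc h
    have : l = [] := List.eq_nil_of_length_eq_zero (Nat.le_zero.mp h)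
    subst this
    simp [PySem.Chars.splitOn.go, scgo]
  | succ n ih =>
    intro l cur acc h
    cases l with
    | nil => simp [PySem.Chars.splitOn.go, scgo]
    | cons c t =>
      simp only [PySem.Chars.splitOn.go, List.isPrefixOf, Bool.and_true, scgo]
      by_cases hc : a = c
      · subst hc
        rw [if_pos (by simp), if_pos rfl]
        rw [ih _ _ _ (by simpa using h)]
        simp
      · rw [if_neg (by simpa using hc), if_neg (Ne.symm hc)]
        exact ih _ _ _ (by simpa using Nat.le_of_succ_le_succ (by simpa using h))

theorem splitOn_single (a : Char) (l : List Char) :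
    PySem.Chars.splitOn l [a] = scgo a l [] := by
  rw [PySem.Chars.splitOn]
  simpa using splitOn_go_single a (l.length + 1) l [] [] (by omega)


theorem flatMap_split0_scgo :
    ∀ (l cur : List Char),
      (scgo ',' l cur).flatMap PySem.Chars.split₀
        = PySem.Chars.split₀ (cur.reverse ++ l.map cmC) := by
  intro l
  induction l with
  | nil => intro cur; simp [scgo]
  | cons c t ih =>
    intro cur
    by_cases hc : c = ','
    · subst hc
      simp only [scgo, List.flatMap_cons, List.map_cons, cmC, eq_self_iff_true, if_true]
      rw [ih []]
      simp only [List.reverse_nil, List.nil_append, PySem.Chars.split₀]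
      exact (split0_go_space (t.map cmC) cur.reverse [] []).symm
    · simp only [scgo, if_neg hc, List.map_cons, cmC, if_neg hc]
      rw [ih (c :: cur)]
      simp

theorem split0_go_subst (f : Char → Char)
    (hf : ∀ c, (PySem.Chars.isspace c = true ∧ PySem.Chars.isspace (f c) = true) ∨ f c = c) :
    ∀ (l cur : List Char) (acc : List (List Char)),
      PySem.Chars.split₀.go (l.map f) cur acc = PySem.Chars.split₀.go l cur acc := by
  intro l
  induction l with
  | nil => intro cur acc; simp
  | cons c t ih =>
    intro cur acc
    rcases hf c with ⟨h1, h2⟩ | h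
    · simp only [List.map_cons, PySem.Chars.split₀.go, h1, h2, if_true]
      by_cases hc : cur.isEmpty <;> simp only [hc, if_true, if_false, Bool.false_eq_true] <;>
        exact ih [] _
    · rw [List.map_cons, h]
      by_cases hs : PySem.Chars.isspace c
      · simp only [PySem.Chars.split₀.go, hs, if_true]
        by_cases hc : cur.isEmpty <;> simp only [hc, if_true, if_false, Bool.false_eq_true] <;>
          exact ih [] _
      · simp only [PySem.Chars.split₀.go, hs, Bool.false_eq_true, if_false]
        exact ih (c :: cur) _

theorem split0_go_map (g : Char → Char)
    (hg : ∀ c, PySem.Chars.isspace (g c) = PySem.Chars.isspace c) :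
    ∀ (l cur : List Char) (acc : List (List Char)),
      PySem.Chars.split₀.go (l.map g) (cur.map g) (acc.map (List.map g))
        = (PySem.Chars.split₀.go l cur acc).map (List.map g) := by
  intro l
  induction l with
  | nil =>
    intro cur acc
    by_cases hc : cur.isEmpty
    · simp [PySem.Chars.split₀.go, hc, List.isEmpty_iff.mp hc]
    · have : (cur.map g).isEmpty = false := by
        simp only [List.isEmpty_map]; simpa using hc
      simp [PySem.Chars.split₀.go, hc, this, List.map_reverse]
  | cons c t ih =>
    intro cur acc
    by_cases hs : PySem.Chars.isspace c
    · have hs' : PySem.Chars.isspace (g c) = true := by rw [hg]; exact hs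
      by_cases hc : cur.isEmpty
      · simp only [List.map_cons, PySem.Chars.split₀.go, hs, hs', if_true, hc,
          List.isEmpty_map, hc]
        exact ih [] acc
      · have hc' : (cur.map g).isEmpty = false := by
          simp only [List.isEmpty_map]; simpa using hc
        simp only [List.map_cons, PySem.Chars.split₀.go, hs, hs', if_true, hc, hc',
          Bool.false_eq_true, if_false]
        have := ih [] (cur.reverse :: acc)
        simpa [List.map_reverse] using this
    · have hs' : PySem.Chars.isspace (g c) = false := by rw [hg]; simpa using hs
      simp only [List.map_cons, PySem.Chars.split₀.go, hs, hs', Bool.false_eq_true, if_false]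
      exact ih (c :: cur) acc

theorem split0_lower (l : List Char) :
    PySem.Chars.split₀ (PySem.Chars.lower l)
      = (PySem.Chars.split₀ l).map (List.map PySem.Chars.lowerChar) := by
  rw [PySem.Chars.lower, PySem.Chars.split₀, PySem.Chars.split₀]
  simpa using split0_go_map PySem.Chars.lowerChar lowerChar_isspace l [] []

theorem split0_go_words :
    ∀ (l cur : List Char) (acc : List (List Char)),
      (∀ c ∈ cur, PySem.Chars.isspace c = false) →
      (∀ w ∈ acc, w ≠ [] ∧ ∀ c ∈ w, PySem.Chars.isspace c = false) →
      ∀ w ∈ PySem.Chars.split₀.go l cur acc, w ≠ [] ∧ ∀ c ∈ w, PySem.Chars.isspace c = false := by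
  intro l
  induction l with
  | nil =>
    intro cur acc hcur hacc w hw
    by_cases hc : cur.isEmpty
    · simp only [PySem.Chars.split₀.go, hc, if_true, List.mem_reverse] at hw
      exact hacc w hw
    · simp only [PySem.Chars.split₀.go, hc, Bool.false_eq_true, if_false,
        List.mem_reverse, List.mem_cons] at hw
      rcases hw with h | h
      · subst h
        refine ⟨by simpa [List.isEmpty_iff] using hc, ?_⟩
        intro c hcm
        exact hcur c (List.mem_reverse.mp hcm)
      · exact hacc w h
  | cons c t ih =>
    intro cur acc hcur hacc w hw
    by_cases hs : PySem.Chars.isspace c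
    · by_cases hc : cur.isEmpty
      · simp only [PySem.Chars.split₀.go, hs, hc, if_true] at hw
        exact ih [] acc (by simp) hacc w hw
      · simp only [PySem.Chars.split₀.go, hs, hc, if_true, Bool.false_eq_true, if_false] at hw
        refine ih [] (cur.reverse :: acc) (by simp) ?_ w hw
        intro v hv
        rcases List.mem_cons.mp hv with h | h
        · subst h
          exact ⟨by simpa [List.isEmpty_iff] using hc,
            fun d hd => hcur d (List.mem_reverse.mp hd)⟩
        · exact hacc v h
    · simp only [PySem.Chars.split₀.go, hs, Bool.false_eq_true, if_false] at hw
      refine ih (c :: cur) acc ?_ hacc w hw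
      intro d hd
      rcases List.mem_cons.mp hd with h | h
      · subst h; simpa using hs
      · exact hcur d h

theorem split0_words (x : List Char) :
    ∀ w ∈ PySem.Chars.split₀ x, w ≠ [] ∧ ∀ c ∈ w, PySem.Chars.isspace c = false := by
  intro w hw
  exact split0_go_words x [] [] (by simp) (by simp) w hw

theorem dropWhile_no_space (t : List Char) (h : ∀ c ∈ t, PySem.Chars.isspace c = false) :
    List.dropWhile PySem.Chars.isspace t = t := by
  cases t with
  | nil => simp
  | cons a s =>
    rw [List.dropWhile_cons_of_neg]
    simpa using h a (by simp)

theorem strip_of_no_space (t : List Char) (h : ∀ c ∈ t, PySem.Chars.isspace c = false) :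
    PySem.Chars.strip t = t := by
  rw [PySem.Chars.strip, PySem.Chars.lstrip, PySem.Chars.rstrip]
  rw [dropWhile_no_space t h, dropWhile_no_space t.reverse
    (fun c hc => h c (List.mem_reverse.mp hc)), List.reverse_reverse]

theorem split0_go_spaces (ws : List Char) (hws : ∀ c ∈ ws, PySem.Chars.isspace c = true) :
    ∀ (cur : List Char) (acc : List (List Char)),
      PySem.Chars.split₀.go ws cur acc = PySem.Chars.split₀.go [] cur acc := by
  induction ws with
  | nil => intro cur acc; rfl
  | cons c t ih =>
    intro cur acc
    have hc : PySem.Chars.isspace c = true := hws c (by simp)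
    have ht : ∀ d ∈ t, PySem.Chars.isspace d = true := fun d hd => hws d (by simp [hd])
    by_cases hcur : cur.isEmpty
    · simp only [PySem.Chars.split₀.go, hc, hcur, if_true]
      rw [ih ht [] acc]
      simp [PySem.Chars.split₀.go, hcur]
    · simp only [PySem.Chars.split₀.go, hc, hcur, if_true, Bool.false_eq_true, if_false]
      rw [ih ht [] (cur.reverse :: acc)]
      simp [PySem.Chars.split₀.go, hcur]

theorem split0_go_append_spaces (ws : List Char)
    (hws : ∀ c ∈ ws, PySem.Chars.isspace c = true) :
    ∀ (w cur : List Char) (acc : List (List Char)),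
      PySem.Chars.split₀.go (w ++ ws) cur acc = PySem.Chars.split₀.go w cur acc := by
  intro w
  induction w with
  | nil => intro cur acc; simpa using split0_go_spaces ws hws cur acc
  | cons c t ih =>
    intro cur acc
    by_cases hs : PySem.Chars.isspace c
    · by_cases hc : cur.isEmpty <;>
        simp only [List.cons_append, PySem.Chars.split₀.go, hs, hc, if_true, if_false,
          Bool.false_eq_true] <;> apply ih
    · simp only [List.cons_append, PySem.Chars.split₀.go, hs, Bool.false_eq_true, if_false]
      apply ih

theorem split0_lstrip (p : List Char) :
    PySem.Chars.split₀ (PySem.Chars.lstrip p) = PySem.Chars.split₀ p := by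
  rw [PySem.Chars.lstrip, PySem.Chars.split₀, PySem.Chars.split₀]
  induction p with
  | nil => rfl
  | cons c t ih =>
    by_cases hs : PySem.Chars.isspace c
    · rw [List.dropWhile_cons_of_pos hs]
      rw [ih]
      simp [PySem.Chars.split₀.go, hs]
    · rw [List.dropWhile_cons_of_neg (by simpa using hs)]

theorem split0_strip (p : List Char) :
    PySem.Chars.split₀ (PySem.Chars.strip p) = PySem.Chars.split₀ p := by
  rw [PySem.Chars.strip]
  have hdecomp : PySem.Chars.lstrip p
      = PySem.Chars.rstrip (PySem.Chars.lstrip p)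
        ++ (List.takeWhile PySem.Chars.isspace (PySem.Chars.lstrip p).reverse).reverse := by
    rw [PySem.Chars.rstrip, ← List.reverse_append, List.takeWhile_append_dropWhile,
      List.reverse_reverse]
  conv_rhs => rw [← split0_lstrip p, hdecomp]
  rw [PySem.Chars.split₀, PySem.Chars.split₀, split0_go_append_spaces]
  intro c hc
  rw [List.mem_reverse] at hc
  exact List.mem_takeWhile_imp hc

theorem toList_injective : Function.Injective String.toList := by
  intro a b h
  rw [← String.ofList_toList (s := a), h, String.ofList_toList]

theorem piece_words (p : String) :
    List.map String.toList
        ((((PySem.Str.split₀ (PySem.Str.lower (PySem.Str.strip p))).filter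
            (fun t => !(PySem.Str.strip t == ""))).map PySem.Str.strip))
      = (PySem.Chars.split₀ p.toList).map (List.map PySem.Chars.lowerChar) := by
  have hW : List.map String.toList (PySem.Str.split₀ (PySem.Str.lower (PySem.Str.strip p)))
      = PySem.Chars.split₀ (PySem.Chars.lower (PySem.Chars.strip p.toList)) := by
    rw [PySem.Str.split₀_map_toList, PySem.Str.toList_lower, PySem.Str.toList_strip]
  have hwords : ∀ w ∈ PySem.Str.split₀ (PySem.Str.lower (PySem.Str.strip p)),
      PySem.Str.strip w = w ∧ w ≠ "" := by
    intro w hw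
    have hmem : w.toList ∈ PySem.Chars.split₀ (PySem.Chars.lower (PySem.Chars.strip p.toList)) := by
      rw [← hW]
      exact List.mem_map_of_mem hw
    obtain ⟨hne, hns⟩ := split0_words _ _ hmem
    constructor
    · apply toList_injective
      rw [PySem.Str.toList_strip, strip_of_no_space _ hns]
    · intro h0
      subst h0
      exact hne rfl
  rw [List.filter_eq_self.mpr, List.map_congr_left (fun w hw => (hwords w hw).1), List.map_id',
    hW, split0_lower, split0_strip]
  intro w hw
  have := hwords w hw
  rw [this.1]
  simpa using this.2

set_option maxHeartbeats 1000000 in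
theorem parse_scopes_A_eq (s : String) (hne : ¬ s = "") :
    parse_scopes (some s)
      = PySem.Set.ofList (PySem.Str.split₀ (PySem.Str.replace (PySem.Str.lower s) "," " ")) := by
  rw [parse_scopes]
  simp only [if_neg hne]
  have hstep : (fun (scopes : PySem.Set String) (part : String) =>
      if part = "" then scopes
      else PySem.Set.update scopes
        (((PySem.Str.split₀ part).filter (fun t => !(PySem.Str.strip t == ""))).map
          PySem.Str.strip))
      = (fun scopes part => PySem.Set.update scopes
        (((PySem.Str.split₀ part).filter (fun t => !(PySem.Str.strip t == ""))).map
          PySem.Str.strip)) := by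
    funext S part
    by_cases hp : part = ""
    · subst hp
      rw [if_pos rfl]
      rfl
    · rw [if_neg hp]
  have main : ∀ (pieces : List String),
      pieces.map String.toList = scgo ',' (List.map nlC s.toList) [] →
      (pieces.map (fun p => PySem.Str.lower (PySem.Str.strip p))).foldl
        (fun scopes part => PySem.Set.update scopes
          (((PySem.Str.split₀ part).filter (fun t => !(PySem.Str.strip t == ""))).map
            PySem.Str.strip)) PySem.Set.empty
      = PySem.Set.ofList (PySem.Str.split₀ (PySem.Str.replace (PySem.Str.lower s) "," " ")) := by
    intro pieces hp
    have hfold : ∀ (L : List String),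
        L.foldl (fun scopes part => PySem.Set.update scopes
          (((PySem.Str.split₀ part).filter (fun t => !(PySem.Str.strip t == ""))).map
            PySem.Str.strip)) PySem.Set.empty
        = PySem.Set.ofList (L.flatMap (fun part =>
            ((PySem.Str.split₀ part).filter (fun t => !(PySem.Str.strip t == ""))).map
              PySem.Str.strip)) := by
      intro L
      rw [PySem.Set.ofList_eq_foldl, List.flatMap, List.foldl_flatten, List.foldl_map]
      rfl
    rw [hfold]
    refine congrArg _ ?_
    apply List.map_injective_iff.mpr toList_injective
    rw [List.map_flatMap, List.flatMap_map]
    rw [show (fun p => List.map String.toList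
        ((((PySem.Str.split₀ (PySem.Str.lower (PySem.Str.strip p))).filter
            (fun t => !(PySem.Str.strip t == ""))).map PySem.Str.strip)))
        = (fun p => (PySem.Chars.split₀ p.toList).map (List.map PySem.Chars.lowerChar))
      from funext piece_words]
    -- A side: push the lowercase map out of the flatMap, collapse comma pieces
    rw [show (fun p : String => (PySem.Chars.split₀ p.toList).map
          (List.map PySem.Chars.lowerChar))
        = (fun p : String => List.map (List.map PySem.Chars.lowerChar)
            (PySem.Chars.split₀ p.toList)) from rfl,
      ← List.map_flatMap]
    have hA : pieces.flatMap (fun p => PySem.Chars.split₀ p.toList)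
        = PySem.Chars.split₀ (List.map cmC s.toList) := by
      have h1 : pieces.flatMap (fun p => PySem.Chars.split₀ p.toList)
          = (pieces.map String.toList).flatMap PySem.Chars.split₀ := by
        rw [List.flatMap_map]
      rw [h1, hp, flatMap_split0_scgo]
      rw [List.reverse_nil, List.nil_append, List.map_map]
      have hcomp : cmC ∘ nlC = nlC ∘ cmC := by
        funext c
        exact cm_nl c
      rw [hcomp, ← List.map_map]
      rw [PySem.Chars.split₀, PySem.Chars.split₀]
      exact split0_go_subst nlC nlC_space (List.map cmC s.toList) [] []
    rw [hA]
    -- B side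
    rw [PySem.Str.split₀_map_toList, PySem.Str.toList_replace, PySem.Str.toList_lower,
      show (",":String).toList = [','] from rfl, show (" ":String).toList = [' '] from rfl,
      replace_single]
    rw [show PySem.Chars.lower s.toList = List.map PySem.Chars.lowerChar s.toList from rfl,
      show (fun c => if c = ',' then ' ' else c) = cmC from rfl,
      List.map_map]
    have hcomp2 : cmC ∘ PySem.Chars.lowerChar = PySem.Chars.lowerChar ∘ cmC := by
      funext c
      exact cm_lower c
    rw [hcomp2, ← List.map_map]
    rw [show List.map PySem.Chars.lowerChar (List.map cmC s.toList)
        = PySem.Chars.lower (List.map cmC s.toList) from rfl, split0_lower]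
  rw [hstep]
  apply main
  rw [PySem.Str.split?]
  rw [show PySem.Chars.split? (PySem.Str.replace s "\n" " ").toList (",":String).toList
      = some (PySem.Chars.splitOn (PySem.Str.replace s "\n" " ").toList [','])
    from by rw [PySem.Chars.split?]; rfl]
  rw [Option.map_some, Option.getD_some, List.map_map,
    show String.toList ∘ String.ofList = id from by funext x; exact String.toList_ofList, List.map_id]
  rw [splitOn_single, PySem.Str.toList_replace,
    show ("\n":String).toList = ['\n'] from rfl, show (" ":String).toList = [' '] from rfl,
    replace_single]
  rfl

-- The B scan, run on any suffix with any pending token, produces exactly the remaining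
-- whitespace-split words of the psF-normalised characters, added in order.
theorem psB_scan_eq :
    ∀ (l : List Char) (S : PySem.Set String) (tok : List Char),
      psB_finish (l.foldl psB_step (S, tok))
        = List.foldl PySem.Set.add S
            ((PySem.Chars.split₀.go (l.map psF) tok.reverse []).map String.ofList) := by
  intro l
  induction l with
  | nil =>
    intro S tok
    by_cases ht : tok.isEmpty
    · have h0 : tok = [] := List.isEmpty_iff.mp ht
      subst h0
      simp [psB_finish, PySem.Chars.split₀.go]
    · have hr : tok.reverse.isEmpty = false := by
        simp only [List.isEmpty_reverse]; simpa using ht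
      simp [psB_finish, PySem.Chars.split₀.go, ht, hr]
  | cons c t ih =>
    intro S tok
    by_cases hd : ((c == ',') || PySem.Chars.isspace c) = true
    · have hsp : PySem.Chars.isspace (psF c) = true := by rw [isspace_psF]; exact hd
      by_cases ht : tok.isEmpty
      · have h0 : tok = [] := List.isEmpty_iff.mp ht
        subst h0
        simp only [List.foldl_cons, psB_step, hd, if_true, List.isEmpty_nil,
          List.map_cons, PySem.Chars.split₀.go, hsp, List.reverse_nil]
        exact ih S []
      · have hr : tok.reverse.isEmpty = false := by
          simp only [List.isEmpty_reverse]; simpa using ht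
        simp only [List.foldl_cons, psB_step, hd, if_true, ht, Bool.false_eq_true, if_false,
          List.map_cons, PySem.Chars.split₀.go, hsp, hr, List.reverse_reverse]
        rw [ih (PySem.Set.add S (String.ofList tok)) [], split0_go_acc (t.map psF) [] [tok]]
        simp
    · have hsp : PySem.Chars.isspace (psF c) = false := by
        rw [isspace_psF]; simpa using hd
      have hcne : ¬ c = ',' := by
        intro h; subst h; simp at hd
      simp only [List.foldl_cons, psB_step, hd, Bool.false_eq_true, if_false,
        List.map_cons, PySem.Chars.split₀.go, hsp]
      rw [ih S (tok ++ [PySem.Chars.lowerChar c])]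
      rw [List.reverse_append, List.reverse_singleton, List.singleton_append,
        psF_of_ne_comma c hcne]

theorem str_split0_ofList (t : String) :
    PySem.Str.split₀ t = (PySem.Chars.split₀ t.toList).map String.ofList := by
  apply List.map_injective_iff.mpr toList_injective
  rw [PySem.Str.split₀_map_toList, List.map_map,
    show String.toList ∘ String.ofList = id from by funext x; exact String.toList_ofList,
    List.map_id]

theorem parse_scopes_B_eq (s : String) (hne : ¬ s = "") :
    parse_scopes_alt (some s)
      = PySem.Set.ofList (PySem.Str.split₀ (PySem.Str.replace (PySem.Str.lower s) "," " ")) := by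
  rw [parse_scopes_alt]
  simp only [if_neg hne]
  rw [psB_scan_eq s.toList PySem.Set.empty []]
  have htl : (PySem.Str.replace (PySem.Str.lower s) "," " ").toList = List.map psF s.toList := by
    rw [PySem.Str.toList_replace, PySem.Str.toList_lower,
      show (",":String).toList = [','] from rfl, show (" ":String).toList = [' '] from rfl,
      replace_single,
      show PySem.Chars.lower s.toList = List.map PySem.Chars.lowerChar s.toList from rfl,
      List.map_map]
    rw [show ((fun c => if c = ',' then ' ' else c) ∘ PySem.Chars.lowerChar)
        = cmC ∘ PySem.Chars.lowerChar from rfl,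
      show cmC ∘ PySem.Chars.lowerChar = PySem.Chars.lowerChar ∘ cmC from funext cm_lower,
      show PySem.Chars.lowerChar ∘ cmC = psF from rfl]
  rw [str_split0_ofList, htl, PySem.Set.ofList_eq_foldl,
    show PySem.Chars.split₀ (List.map psF s.toList)
      = PySem.Chars.split₀.go (List.map psF s.toList) [] [] from by rw [PySem.Chars.split₀]]
  rfl

-- ===== VERDICT (by name: the statement is the Claim_ definition above) =====
theorem parse_scopes_spec : Claim_equal_parse_scopes := by
  intro scopes_text _
  unfold Spec_parse_scopes
  cases scopes_text with
  | none => rfl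
  | some s =>
    by_cases h : s = ""
    · subst h
      rfl
    · rw [parse_scopes_A_eq s h, parse_scopes_B_eq s h]
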